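-- pv_equiv track=rewrite | github.com/torbite/Chess_Bot | backend/chess/utils.py | get_hv_rules
-- ===== SOURCE A (Python) =====
-- def get_hv_rules(bit_pos, limit_range = False):
--     row = bit_pos // 8
--     col = bit_pos % 8
--
--     horizontal_rules = []
--     vertical_rules = []
--     diag_rules = []
--
--     def append_if_not_empty(container, values):
--         if values:
--             container.append(values)
--
--     if not limit_range:
--         # Horizontal (left / right)
--         append_if_not_empty(
--             horizontal_rules,
--             list(range(bit_pos - 1, row * 8 - 1, -1)) if col > 0 else []
--         )
--         append_if_not_empty(
--             horizontal_rules,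
--             list(range(bit_pos + 1, row * 8 + 8)) if col < 7 else []
--         )
--
--         # Vertical (up / down)
--         append_if_not_empty(
--             vertical_rules,
--             list(range(bit_pos + 8, 64, 8)) if row < 7 else []
--         )
--         append_if_not_empty(
--             vertical_rules,
--             list(range(bit_pos - 8, -1, -8)) if row > 0 else []
--         )
--
--         # Diagonals
--         # Up-left
--         up_left = []
--         r, c = row + 1, col - 1
--         while r <= 7 and c >= 0:
--             up_left.append(r * 8 + c)
--             r += 1
--             c -= 1
--         append_if_not_empty(diag_rules, up_left)
--
--         # Up-right
--         up_right = []
--         r, c = row + 1, col + 1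
--         while r <= 7 and c <= 7:
--             up_right.append(r * 8 + c)
--             r += 1
--             c += 1
--         append_if_not_empty(diag_rules, up_right)
--
--         # Down-right
--         down_right = []
--         r, c = row - 1, col + 1
--         while r >= 0 and c <= 7:
--             down_right.append(r * 8 + c)
--             r -= 1
--             c += 1
--         append_if_not_empty(diag_rules, down_right)
--
--         # Down-left
--         down_left = []
--         r, c = row - 1, col - 1
--         while r >= 0 and c >= 0:
--             down_left.append(r * 8 + c)
--             r -= 1
--             c -= 1
--         append_if_not_empty(diag_rules, down_left)
--     else:
--         # Adjacent squares only
--         if col > 0: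
--             append_if_not_empty(horizontal_rules, [bit_pos - 1])
--         if col < 7:
--             append_if_not_empty(horizontal_rules, [bit_pos + 1])
--
--         if row < 7:
--             append_if_not_empty(vertical_rules, [bit_pos + 8])
--         if row > 0:
--             append_if_not_empty(vertical_rules, [bit_pos - 8])
--
--         if row < 7 and col > 0:
--             append_if_not_empty(diag_rules, [bit_pos + 7])
--         if row < 7 and col < 7:
--             append_if_not_empty(diag_rules, [bit_pos + 9])
--         if row > 0 and col < 7:
--             append_if_not_empty(diag_rules, [bit_pos - 7])
--         if row > 0 and col > 0:
--             append_if_not_empty(diag_rules, [bit_pos - 9])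
--
--     return horizontal_rules, vertical_rules, diag_rules
-- ===== SOURCE B (Python) =====
-- def get_hv_rules(bit_pos, limit_range=False):
--     row, col = divmod(bit_pos, 8)
--
--     def ray(dr, dc):
--         reach = []
--         if dr > 0: reach.append(7 - row)
--         if dr < 0: reach.append(row)
--         if dc > 0: reach.append(7 - col)
--         if dc < 0: reach.append(col)
--         n = max(0, min(reach))
--         if limit_range:
--             n = min(n, 1)
--         return [(row + k * dr) * 8 + (col + k * dc) for k in range(1, n + 1)]
--
--     def rays(dirs):
--         return [r for r in (ray(dr, dc) for dr, dc in dirs) if r]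
--
--     return (rays([(0, -1), (0, 1)]),
--             rays([(1, 0), (-1, 0)]),
--             rays([(1, -1), (1, 1), (-1, 1), (-1, -1)]))
-- ===== Notes on version B (the rewrite author's own statement) =====
-- stated objective: simpler
-- what changed: Replaces A's eight hand-written direction blocks (four range() calls, four while loops) and its separate limit_range branch with a single data-driven ray builder: three direction tables, a closed-form ray length n = max(0, min(reach)) per direction (capped at 1 when limit_range), and one comprehension emitting the ray.
import Mathlib
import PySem

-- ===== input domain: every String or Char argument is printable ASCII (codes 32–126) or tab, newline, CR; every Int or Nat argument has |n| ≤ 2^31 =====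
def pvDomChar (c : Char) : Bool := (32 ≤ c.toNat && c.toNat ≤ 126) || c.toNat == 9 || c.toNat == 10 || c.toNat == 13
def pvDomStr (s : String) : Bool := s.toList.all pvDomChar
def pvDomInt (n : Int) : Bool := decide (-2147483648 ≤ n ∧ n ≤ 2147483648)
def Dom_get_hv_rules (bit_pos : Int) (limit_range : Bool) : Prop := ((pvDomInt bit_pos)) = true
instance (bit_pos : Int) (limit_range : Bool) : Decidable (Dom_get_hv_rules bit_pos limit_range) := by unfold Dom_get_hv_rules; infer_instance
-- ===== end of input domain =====

-- B replaces A's eight hand-written direction blocks and separate limit_range branch by one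
-- data-driven ray builder with a closed-form ray length; objective: simpler (no speed claim).

-- ===== PORT A =====
def pvAppendIfNotEmpty (container : List (List Int)) (values : List Int) : List (List Int) :=
  if values ≠ [] then container ++ [values] else container

def pvUpLeft (r c : Int) : List Int :=
  if _h : r ≤ 7 ∧ 0 ≤ c then (r * 8 + c) :: pvUpLeft (r + 1) (c - 1) else []
termination_by (8 - r).toNat
decreasing_by omega

def pvUpRight (r c : Int) : List Int :=
  if _h : r ≤ 7 ∧ c ≤ 7 then (r * 8 + c) :: pvUpRight (r + 1) (c + 1) else []
termination_by (8 - r).toNat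
decreasing_by omega

def pvDownRight (r c : Int) : List Int :=
  if _h : 0 ≤ r ∧ c ≤ 7 then (r * 8 + c) :: pvDownRight (r - 1) (c + 1) else []
termination_by (r + 1).toNat
decreasing_by omega

def pvDownLeft (r c : Int) : List Int :=
  if _h : 0 ≤ r ∧ 0 ≤ c then (r * 8 + c) :: pvDownLeft (r - 1) (c - 1) else []
termination_by (r + 1).toNat
decreasing_by omega

def get_hv_rules (bit_pos : Int) (limit_range : Bool) : List (List Int) × List (List Int) × List (List Int) :=
  let row := PySem.Int.floordiv bit_pos 8
  let col := PySem.Int.mod bit_pos 8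
  if !limit_range then
    let h1 := pvAppendIfNotEmpty [] (if 0 < col then PySem.List.pyRange (bit_pos - 1) (row * 8 - 1) (-1) else [])
    let h2 := pvAppendIfNotEmpty h1 (if col < 7 then PySem.List.pyRange (bit_pos + 1) (row * 8 + 8) 1 else [])
    let v1 := pvAppendIfNotEmpty [] (if row < 7 then PySem.List.pyRange (bit_pos + 8) 64 8 else [])
    let v2 := pvAppendIfNotEmpty v1 (if 0 < row then PySem.List.pyRange (bit_pos - 8) (-1) (-8) else [])
    let d1 := pvAppendIfNotEmpty [] (pvUpLeft (row + 1) (col - 1))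
    let d2 := pvAppendIfNotEmpty d1 (pvUpRight (row + 1) (col + 1))
    let d3 := pvAppendIfNotEmpty d2 (pvDownRight (row - 1) (col + 1))
    let d4 := pvAppendIfNotEmpty d3 (pvDownLeft (row - 1) (col - 1))
    (h2, v2, d4)
  else
    let h1 := if 0 < col then pvAppendIfNotEmpty [] [bit_pos - 1] else []
    let h2 := if col < 7 then pvAppendIfNotEmpty h1 [bit_pos + 1] else h1
    let v1 := if row < 7 then pvAppendIfNotEmpty [] [bit_pos + 8] else []
    let v2 := if 0 < row then pvAppendIfNotEmpty v1 [bit_pos - 8] else v1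
    let d1 := if row < 7 ∧ 0 < col then pvAppendIfNotEmpty [] [bit_pos + 7] else []
    let d2 := if row < 7 ∧ col < 7 then pvAppendIfNotEmpty d1 [bit_pos + 9] else d1
    let d3 := if 0 < row ∧ col < 7 then pvAppendIfNotEmpty d2 [bit_pos - 7] else d2
    let d4 := if 0 < row ∧ 0 < col then pvAppendIfNotEmpty d3 [bit_pos - 9] else d3
    (h2, v2, d4)

-- ===== PORT B =====
-- reach is nonempty for every (dr, dc) B passes (they are never both 0), so Python's
-- min(reach) never raises; `.getD 0` only totalizes min? on the unreachable empty case.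
def pvAltRay (limit : Bool) (row col dr dc : Int) : List Int :=
  let reach : List Int :=
    (if 0 < dr then [7 - row] else []) ++ (if dr < 0 then [row] else []) ++
    (if 0 < dc then [7 - col] else []) ++ (if dc < 0 then [col] else [])
  let n := max 0 ((PySem.List.min? reach (fun y => y)).getD 0)
  let n := if limit then min n 1 else n
  (PySem.List.pyRange 1 (n + 1) 1).map (fun k => (row + k * dr) * 8 + (col + k * dc))

def pvAltRays (limit : Bool) (row col : Int) (dirs : List (Int × Int)) : List (List Int) :=
  (dirs.map (fun d => pvAltRay limit row col d.1 d.2)).filter (fun r => !r.isEmpty)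

def get_hv_rules_alt (bit_pos : Int) (limit_range : Bool) : List (List Int) × List (List Int) × List (List Int) :=
  let row := PySem.Int.floordiv bit_pos 8
  let col := PySem.Int.mod bit_pos 8
  (pvAltRays limit_range row col [(0, -1), (0, 1)],
   pvAltRays limit_range row col [(1, 0), (-1, 0)],
   pvAltRays limit_range row col [(1, -1), (1, 1), (-1, 1), (-1, -1)])

-- ===== PRECONDITION & SPEC =====
def Spec_get_hv_rules (bit_pos : Int) (limit_range : Bool) (out : List (List Int) × List (List Int) × List (List Int)) : Prop := out = get_hv_rules_alt bit_pos limit_range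
instance (bit_pos : Int) (limit_range : Bool) (out : List (List Int) × List (List Int) × List (List Int)) : Decidable (Spec_get_hv_rules bit_pos limit_range out) := by unfold Spec_get_hv_rules; infer_instance

-- ===== CLAIM (what is proved, stated in full; the proofs are below) =====
def Claim_equal_get_hv_rules : Prop := ∀ (bit_pos : Int) (limit_range : Bool), Dom_get_hv_rules bit_pos limit_range → Spec_get_hv_rules bit_pos limit_range (get_hv_rules bit_pos limit_range)

-- ===== LEMMAS AND PROOFS =====

theorem appendIf_eq (acc : List (List Int)) (v : List Int) :
    pvAppendIfNotEmpty acc v = acc ++ List.filter (fun r => !r.isEmpty) [v] := by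
  cases v <;> simp [pvAppendIfNotEmpty]

theorem filt_cons2 {alpha : Type} (p : alpha → Bool) (x y : alpha) (l : List alpha) :
    List.filter p (x :: y :: l) = List.filter p [x] ++ List.filter p (y :: l) := by
  by_cases h : p x <;> simp [h]

theorem ite_append_acc {alpha : Type} (G : Prop) [Decidable G] (acc t : List alpha) :
    (if G then acc ++ t else acc) = acc ++ (if G then t else []) := by
  split <;> simp

theorem filt_single (x : Int) (xs : List Int) :
    List.filter (fun r => !r.isEmpty) [x :: xs] = [x :: xs] := by simp

-- closed forms of A's four diagonal while-loops
theorem pvUpLeft_eq (r c : Int) :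
    pvUpLeft r c = (List.range (min (8 - r) (c + 1)).toNat).map
      (fun k : Nat => (r + (k : Int)) * 8 + (c - (k : Int))) := by
  rw [pvUpLeft]
  split
  · next h =>
    rw [pvUpLeft_eq (r + 1) (c - 1)]
    have hm : (min (8 - r) (c + 1)).toNat = (min (8 - (r + 1)) ((c - 1) + 1)).toNat + 1 := by omega
    rw [hm, List.range_succ_eq_map, List.map_cons, List.map_map]
    refine congrArg₂ _ (by push_cast; ring) ?_
    refine List.map_congr_left (fun k _ => ?_)
    simp only [Function.comp_apply, Nat.succ_eq_add_one]
    push_cast; ring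
  · next h =>
    have hm : (min (8 - r) (c + 1)).toNat = 0 := by omega
    rw [hm]; simp
termination_by (8 - r).toNat
decreasing_by omega

theorem pvUpRight_eq (r c : Int) :
    pvUpRight r c = (List.range (min (8 - r) (8 - c)).toNat).map
      (fun k : Nat => (r + (k : Int)) * 8 + (c + (k : Int))) := by
  rw [pvUpRight]
  split
  · next h =>
    rw [pvUpRight_eq (r + 1) (c + 1)]
    have hm : (min (8 - r) (8 - c)).toNat = (min (8 - (r + 1)) (8 - (c + 1))).toNat + 1 := by omega
    rw [hm, List.range_succ_eq_map, List.map_cons, List.map_map]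
    refine congrArg₂ _ (by push_cast; ring) ?_
    refine List.map_congr_left (fun k _ => ?_)
    simp only [Function.comp_apply, Nat.succ_eq_add_one]
    push_cast; ring
  · next h =>
    have hm : (min (8 - r) (8 - c)).toNat = 0 := by omega
    rw [hm]; simp
termination_by (8 - r).toNat
decreasing_by omega

theorem pvDownRight_eq (r c : Int) :
    pvDownRight r c = (List.range (min (r + 1) (8 - c)).toNat).map
      (fun k : Nat => (r - (k : Int)) * 8 + (c + (k : Int))) := by
  rw [pvDownRight]
  split
  · next h =>
    rw [pvDownRight_eq (r - 1) (c + 1)]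
    have hm : (min (r + 1) (8 - c)).toNat = (min ((r - 1) + 1) (8 - (c + 1))).toNat + 1 := by omega
    rw [hm, List.range_succ_eq_map, List.map_cons, List.map_map]
    refine congrArg₂ _ (by push_cast; ring) ?_
    refine List.map_congr_left (fun k _ => ?_)
    simp only [Function.comp_apply, Nat.succ_eq_add_one]
    push_cast; ring
  · next h =>
    have hm : (min (r + 1) (8 - c)).toNat = 0 := by omega
    rw [hm]; simp
termination_by (r + 1).toNat
decreasing_by omega

theorem pvDownLeft_eq (r c : Int) :
    pvDownLeft r c = (List.range (min (r + 1) (c + 1)).toNat).map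
      (fun k : Nat => (r - (k : Int)) * 8 + (c - (k : Int))) := by
  rw [pvDownLeft]
  split
  · next h =>
    rw [pvDownLeft_eq (r - 1) (c - 1)]
    have hm : (min (r + 1) (c + 1)).toNat = (min ((r - 1) + 1) ((c - 1) + 1)).toNat + 1 := by omega
    rw [hm, List.range_succ_eq_map, List.map_cons, List.map_map]
    refine congrArg₂ _ (by push_cast; ring) ?_
    refine List.map_congr_left (fun k _ => ?_)
    simp only [Function.comp_apply, Nat.succ_eq_add_one]
    push_cast; ring
  · next h =>
    have hm : (min (r + 1) (c + 1)).toNat = 0 := by omega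
    rw [hm]; simp
termination_by (r + 1).toNat
decreasing_by omega

-- B's ray reduced to a map over List.range, given the evaluated min of reach
theorem altRay_false (row col dr dc m : Int)
    (hm : PySem.List.min?
      ((if 0 < dr then [7 - row] else []) ++ (if dr < 0 then [row] else []) ++
       (if 0 < dc then [7 - col] else []) ++ (if dc < 0 then [col] else [])) (fun y => y) = some m) :
    pvAltRay false row col dr dc = (List.range (max 0 m).toNat).map
      (fun k : Nat => (row + (1 + (k : Int)) * dr) * 8 + (col + (1 + (k : Int)) * dc)) := by
  unfold pvAltRay
  dsimp only
  rw [hm]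
  rw [if_neg (by decide : ¬ ((false : Bool) = true))]
  simp only [Option.getD_some]
  rw [PySem.List.pyRange_one]
  have h1 : (max 0 m + 1 - 1).toNat = (max 0 m).toNat := by omega
  rw [h1, List.map_map]
  rfl

theorem altRay_true (row col dr dc m : Int)
    (hm : PySem.List.min?
      ((if 0 < dr then [7 - row] else []) ++ (if dr < 0 then [row] else []) ++
       (if 0 < dc then [7 - col] else []) ++ (if dc < 0 then [col] else [])) (fun y => y) = some m) :
    pvAltRay true row col dr dc = (List.range (min (max 0 m) 1).toNat).map
      (fun k : Nat => (row + (1 + (k : Int)) * dr) * 8 + (col + (1 + (k : Int)) * dc)) := by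
  unfold pvAltRay
  dsimp only
  rw [hm]
  rw [if_pos (rfl : (true : Bool) = true)]
  simp only [Option.getD_some]
  rw [PySem.List.pyRange_one]
  have h1 : (min (max 0 m) 1 + 1 - 1).toNat = (min (max 0 m) 1).toNat := by omega
  rw [h1, List.map_map]
  rfl

-- the eight directions, unlimited
theorem dirL (row col : Int) (h0 : 0 ≤ col) (h8 : col < 8) :
    (if 0 < col then PySem.List.pyRange (row * 8 + col - 1) (row * 8 - 1) (-1) else []) =
      pvAltRay false row col 0 (-1) := by
  rw [altRay_false row col 0 (-1) col (by norm_num [PySem.List.min?_id_cons])]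
  by_cases hc : 0 < col
  · rw [if_pos hc, PySem.List.pyRange_neg_one]
    have hn : (row * 8 + col - 1 - (row * 8 - 1)).toNat = (max 0 col).toNat := by omega
    rw [hn]
    exact List.map_congr_left (fun k _ => by push_cast; ring)
  · rw [if_neg hc]
    have hn : (max 0 col).toNat = 0 := by omega
    rw [hn]; simp

theorem dirR (row col : Int) (h0 : 0 ≤ col) (h8 : col < 8) :
    (if col < 7 then PySem.List.pyRange (row * 8 + col + 1) (row * 8 + 8) 1 else []) =
      pvAltRay false row col 0 1 := by
  rw [altRay_false row col 0 1 (7 - col) (by norm_num [PySem.List.min?_id_cons])]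
  by_cases hc : col < 7
  · rw [if_pos hc, PySem.List.pyRange_one]
    have hn : (row * 8 + 8 - (row * 8 + col + 1)).toNat = (max 0 (7 - col)).toNat := by omega
    rw [hn]
    exact List.map_congr_left (fun k _ => by push_cast; ring)
  · rw [if_neg hc]
    have hn : (max 0 (7 - col)).toNat = 0 := by omega
    rw [hn]; simp

theorem dirU (row col : Int) (h0 : 0 ≤ col) (h8 : col < 8) :
    (if row < 7 then PySem.List.pyRange (row * 8 + col + 8) 64 8 else []) =
      pvAltRay false row col 1 0 := by
  rw [altRay_false row col 1 0 (7 - row) (by norm_num [PySem.List.min?_id_cons])]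
  by_cases hr : row < 7
  · rw [if_pos hr, PySem.List.pyRange_of_pos _ _ (by norm_num : (0:Int) < 8)]
    rw [if_pos (by omega : row * 8 + col + 8 < 64)]
    have hn : ((64 - (row * 8 + col + 8) + 8 - 1) / 8).toNat = (max 0 (7 - row)).toNat := by omega
    rw [hn]
    exact List.map_congr_left (fun k _ => by push_cast; ring)
  · rw [if_neg hr]
    have hn : (max 0 (7 - row)).toNat = 0 := by omega
    rw [hn]; simp

theorem dirD (row col : Int) (h0 : 0 ≤ col) (h8 : col < 8) :
    (if 0 < row then PySem.List.pyRange (row * 8 + col - 8) (-1) (-8) else []) =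
      pvAltRay false row col (-1) 0 := by
  rw [altRay_false row col (-1) 0 row (by norm_num [PySem.List.min?_id_cons])]
  by_cases hr : 0 < row
  · rw [if_pos hr, PySem.List.pyRange_of_neg _ _ (by norm_num : (-8:Int) < 0)]
    rw [if_pos (by omega : (-1:Int) < row * 8 + col - 8)]
    have hn : ((row * 8 + col - 8 - (-1) + -(-8) - 1) / -(-8)).toNat = (max 0 row).toNat := by
      norm_num; omega
    rw [hn]
    exact List.map_congr_left (fun k _ => by push_cast; ring)
  · rw [if_neg hr]
    have hn : (max 0 row).toNat = 0 := by omega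
    rw [hn]; simp

theorem dirUL (row col : Int) (h0 : 0 ≤ col) (h8 : col < 8) :
    pvUpLeft (row + 1) (col - 1) = pvAltRay false row col 1 (-1) := by
  rw [altRay_false row col 1 (-1) (min (7 - row) col)
    (by norm_num [PySem.List.min?_id_cons])]
  rw [pvUpLeft_eq]
  have hn : (min (8 - (row + 1)) ((col - 1) + 1)).toNat = (max 0 (min (7 - row) col)).toNat := by omega
  rw [hn]
  exact List.map_congr_left (fun k _ => by push_cast; ring)

theorem dirUR (row col : Int) (h0 : 0 ≤ col) (h8 : col < 8) :
    pvUpRight (row + 1) (col + 1) = pvAltRay false row col 1 1 := by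
  rw [altRay_false row col 1 1 (min (7 - row) (7 - col))
    (by norm_num [PySem.List.min?_id_cons])]
  rw [pvUpRight_eq]
  have hn : (min (8 - (row + 1)) (8 - (col + 1))).toNat = (max 0 (min (7 - row) (7 - col))).toNat := by omega
  rw [hn]
  exact List.map_congr_left (fun k _ => by push_cast; ring)

theorem dirDR (row col : Int) (h0 : 0 ≤ col) (h8 : col < 8) :
    pvDownRight (row - 1) (col + 1) = pvAltRay false row col (-1) 1 := by
  rw [altRay_false row col (-1) 1 (min row (7 - col))
    (by norm_num [PySem.List.min?_id_cons])]
  rw [pvDownRight_eq]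
  have hn : (min ((row - 1) + 1) (8 - (col + 1))).toNat = (max 0 (min row (7 - col))).toNat := by omega
  rw [hn]
  exact List.map_congr_left (fun k _ => by push_cast; ring)

theorem dirDL (row col : Int) (h0 : 0 ≤ col) (h8 : col < 8) :
    pvDownLeft (row - 1) (col - 1) = pvAltRay false row col (-1) (-1) := by
  rw [altRay_false row col (-1) (-1) (min row col)
    (by norm_num [PySem.List.min?_id_cons])]
  rw [pvDownLeft_eq]
  have hn : (min ((row - 1) + 1) ((col - 1) + 1)).toNat = (max 0 (min row col)).toNat := by omega
  rw [hn]
  exact List.map_congr_left (fun k _ => by push_cast; ring)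

-- the eight directions, limited to one step
theorem limGen (row col dr dc m v : Int)
    (hm : PySem.List.min?
      ((if 0 < dr then [7 - row] else []) ++ (if dr < 0 then [row] else []) ++
       (if 0 < dc then [7 - col] else []) ++ (if dc < 0 then [col] else [])) (fun y => y) = some m)
    (hv : v = (row + dr) * 8 + (col + dc)) (G : Prop) [Decidable G] (hG : G ↔ 1 ≤ m) :
    (if G then [[v]] else []) = List.filter (fun r => !r.isEmpty) [pvAltRay true row col dr dc] := by
  rw [altRay_true row col dr dc m hm]
  by_cases hg : G
  · rw [if_pos hg]
    have h1 : (min (max 0 m) 1).toNat = 1 := by have := hG.mp hg; omega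
    rw [h1]
    simp only [List.range_one, List.map_cons, List.map_nil, List.filter, List.isEmpty_cons,
      Bool.not_false, Nat.cast_zero]
    rw [hv]; norm_num
  · rw [if_neg hg]
    have h1 : (min (max 0 m) 1).toNat = 0 := by
      have := hG.not.mp hg; omega
    rw [h1]
    simp

theorem limL (row col : Int) (h0 : 0 ≤ col) (h8 : col < 8) :
    (if 0 < col then [[row * 8 + col - 1]] else []) =
      List.filter (fun r => !r.isEmpty) [pvAltRay true row col 0 (-1)] :=
  limGen row col 0 (-1) col (row * 8 + col - 1) (by norm_num [PySem.List.min?_id_cons]) (by ring) (0 < col) (by omega)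

theorem limR (row col : Int) (h0 : 0 ≤ col) (h8 : col < 8) :
    (if col < 7 then [[row * 8 + col + 1]] else []) =
      List.filter (fun r => !r.isEmpty) [pvAltRay true row col 0 1] :=
  limGen row col 0 1 (7 - col) (row * 8 + col + 1) (by norm_num [PySem.List.min?_id_cons]) (by ring) (col < 7) (by omega)

theorem limU (row col : Int) (h0 : 0 ≤ col) (h8 : col < 8) :
    (if row < 7 then [[row * 8 + col + 8]] else []) =
      List.filter (fun r => !r.isEmpty) [pvAltRay true row col 1 0] :=
  limGen row col 1 0 (7 - row) (row * 8 + col + 8) (by norm_num [PySem.List.min?_id_cons]) (by ring) (row < 7) (by omega)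

theorem limD (row col : Int) (h0 : 0 ≤ col) (h8 : col < 8) :
    (if 0 < row then [[row * 8 + col - 8]] else []) =
      List.filter (fun r => !r.isEmpty) [pvAltRay true row col (-1) 0] :=
  limGen row col (-1) 0 row (row * 8 + col - 8) (by norm_num [PySem.List.min?_id_cons]) (by ring) (0 < row) (by omega)

theorem limUL (row col : Int) (h0 : 0 ≤ col) (h8 : col < 8) :
    (if row < 7 ∧ 0 < col then [[row * 8 + col + 7]] else []) =
      List.filter (fun r => !r.isEmpty) [pvAltRay true row col 1 (-1)] :=
  limGen row col 1 (-1) (min (7 - row) col) (row * 8 + col + 7) (by norm_num [PySem.List.min?_id_cons]) (by ring) (row < 7 ∧ 0 < col) (by omega)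

theorem limUR (row col : Int) (h0 : 0 ≤ col) (h8 : col < 8) :
    (if row < 7 ∧ col < 7 then [[row * 8 + col + 9]] else []) =
      List.filter (fun r => !r.isEmpty) [pvAltRay true row col 1 1] :=
  limGen row col 1 1 (min (7 - row) (7 - col)) (row * 8 + col + 9) (by norm_num [PySem.List.min?_id_cons]) (by ring) (row < 7 ∧ col < 7) (by omega)

theorem limDR (row col : Int) (h0 : 0 ≤ col) (h8 : col < 8) :
    (if 0 < row ∧ col < 7 then [[row * 8 + col - 7]] else []) =
      List.filter (fun r => !r.isEmpty) [pvAltRay true row col (-1) 1] :=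
  limGen row col (-1) 1 (min row (7 - col)) (row * 8 + col - 7) (by norm_num [PySem.List.min?_id_cons]) (by ring) (0 < row ∧ col < 7) (by omega)

theorem limDL (row col : Int) (h0 : 0 ≤ col) (h8 : col < 8) :
    (if 0 < row ∧ 0 < col then [[row * 8 + col - 9]] else []) =
      List.filter (fun r => !r.isEmpty) [pvAltRay true row col (-1) (-1)] :=
  limGen row col (-1) (-1) (min row col) (row * 8 + col - 9) (by norm_num [PySem.List.min?_id_cons]) (by ring) (0 < row ∧ 0 < col) (by omega)

theorem get_hv_rules_aux (row col : Int) (h0 : 0 ≤ col) (h8 : col < 8) (lr : Bool)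
    (hfd : PySem.Int.floordiv (row * 8 + col) 8 = row)
    (hmd : PySem.Int.mod (row * 8 + col) 8 = col) :
    get_hv_rules (row * 8 + col) lr = get_hv_rules_alt (row * 8 + col) lr := by
  cases lr with
  | false =>
    unfold get_hv_rules get_hv_rules_alt
    dsimp only
    rw [hfd, hmd]
    rw [if_pos (by decide : (!(false : Bool)) = true)]
    rw [dirL row col h0 h8, dirR row col h0 h8, dirU row col h0 h8, dirD row col h0 h8,
      dirUL row col h0 h8, dirUR row col h0 h8, dirDR row col h0 h8, dirDL row col h0 h8]
    simp only [appendIf_eq, pvAltRays, List.map, filt_cons2, List.nil_append, List.append_assoc]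
  | true =>
    unfold get_hv_rules get_hv_rules_alt
    dsimp only
    rw [hfd, hmd]
    rw [if_neg (by decide : ¬ (!(true : Bool)) = true)]
    simp only [appendIf_eq, filt_single, ite_append_acc, List.nil_append]
    rw [limL row col h0 h8, limR row col h0 h8, limU row col h0 h8, limD row col h0 h8,
      limUL row col h0 h8, limUR row col h0 h8, limDR row col h0 h8, limDL row col h0 h8]
    simp only [pvAltRays, List.map, filt_cons2, List.append_assoc]

-- ===== VERDICT (by name: the statement is the Claim_ definition above) =====
theorem get_hv_rules_spec : Claim_equal_get_hv_rules := by
  intro bp lr _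
  unfold Spec_get_hv_rules
  have hfd0 : PySem.Int.floordiv bp 8 * 8 + PySem.Int.mod bp 8 = bp :=
    PySem.Int.floordiv_mul_add_mod bp 8
  have h0 : 0 ≤ PySem.Int.mod bp 8 := PySem.Int.mod_nonneg bp (by norm_num)
  have h8 : PySem.Int.mod bp 8 < 8 := PySem.Int.mod_lt bp (by norm_num)
  have hfd : PySem.Int.floordiv (PySem.Int.floordiv bp 8 * 8 + PySem.Int.mod bp 8) 8
      = PySem.Int.floordiv bp 8 := by rw [hfd0]
  have hmd : PySem.Int.mod (PySem.Int.floordiv bp 8 * 8 + PySem.Int.mod bp 8) 8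
      = PySem.Int.mod bp 8 := by rw [hfd0]
  have := get_hv_rules_aux (PySem.Int.floordiv bp 8) (PySem.Int.mod bp 8) h0 h8 lr hfd hmd
  rwa [hfd0] at this
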